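-- pv_equiv track=rewrite | github.com/MartinSamanez14/trustyapp | main.py | create_modtable
-- ===== SOURCE A (Python) =====
-- def create_modtable(mult_key, keyword):
--     add_key = 0
--     for char in keyword:
--         add_key = (add_key + ord(char)) % 256
--     placelist = list(range(256))
--     for i in placelist:
--         placelist[i] = (mult_key * i + add_key) % 256
--     return placelist
-- ===== SOURCE B (Python) =====
-- def create_modtable(mult_key, keyword):
--     val = sum(map(ord, keyword)) % 256
--     table = []
--     for _ in range(256):
--         table.append(val)
--         val = (val + mult_key) % 256
--     return table
-- ===== Notes on version B (the rewrite author's own statement) =====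
-- stated objective: faster
-- what changed: B replaces A's per-index affine formula (mult_key*i + add_key) % 256 (written into a pre-built range list that A mutates while iterating over it) with a running accumulator started at sum(ord)%256, appended and incremented by mult_key mod 256 each step, so no index list is built and the per-element multiplication disappears (strength reduction).
import Mathlib
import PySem

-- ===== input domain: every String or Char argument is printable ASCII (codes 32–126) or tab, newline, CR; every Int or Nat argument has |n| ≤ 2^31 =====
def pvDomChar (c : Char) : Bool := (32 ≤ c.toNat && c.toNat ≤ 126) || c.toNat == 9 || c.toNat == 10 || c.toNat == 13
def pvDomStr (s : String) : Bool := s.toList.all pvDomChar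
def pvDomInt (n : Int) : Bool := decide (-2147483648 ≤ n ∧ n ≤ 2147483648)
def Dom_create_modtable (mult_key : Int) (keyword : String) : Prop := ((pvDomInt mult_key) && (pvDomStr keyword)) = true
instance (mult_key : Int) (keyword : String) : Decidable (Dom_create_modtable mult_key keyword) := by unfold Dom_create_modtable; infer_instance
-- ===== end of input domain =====

-- B builds the table with a running accumulator (strength reduction) instead of A's
-- per-index affine formula written into a range list mutated during iteration; same values.

-- ===== PORT A =====
-- `for i in placelist: placelist[i] = …` iterates the list by position while mutating it:
-- ported as a fold over the 256 iteration positions, reading the CURRENT list at each position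
-- (the list's length never changes, so the iterator runs exactly 256 steps) — exact.
def create_modtable (mult_key : Int) (keyword : String) : List Int :=
  let add_key := keyword.toList.foldl (fun a c => PySem.Int.mod (a + (c.toNat : Int)) 256) 0
  let placelist := PySem.List.pyRange 0 256 1
  (List.range 256).foldl (fun (l : List Int) (k : Nat) =>
      let i := PySem.List.pyGetD l (k : Int) 0
      PySem.List.pySetD l i (PySem.Int.mod (mult_key * i + add_key) 256)) placelist

-- ===== PORT B =====
def create_modtable_alt (mult_key : Int) (keyword : String) : List Int :=
  let val0 := PySem.Int.mod ((keyword.toList.map (fun c => (c.toNat : Int))).sum) 256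
  ((List.range 256).foldl (fun (s : List Int × Int) (_ : Nat) =>
      (s.1 ++ [s.2], PySem.Int.mod (s.2 + mult_key) 256)) ([], val0)).1

-- ===== PRECONDITION & SPEC =====
def Spec_create_modtable (mult_key : Int) (keyword : String) (out : List Int) : Prop := out = create_modtable_alt mult_key keyword
instance (mult_key : Int) (keyword : String) (out : List Int) : Decidable (Spec_create_modtable mult_key keyword out) := by unfold Spec_create_modtable; infer_instance

-- ===== CLAIM (what is proved, stated in full; the proofs are below) =====
def Claim_equal_create_modtable : Prop := ∀ (mult_key : Int) (keyword : String), Dom_create_modtable mult_key keyword → Spec_create_modtable mult_key keyword (create_modtable mult_key keyword)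

-- ===== LEMMAS AND PROOFS =====

-- the common closed form of the j-th table entry
def pvG (m a : Int) (j : Nat) : Int := (m * (j : Int) + a) % 256

lemma pv_addkey_fold (l : List Char) : ∀ (x : Int), x % 256 = x →
    l.foldl (fun a c => (a + (c.toNat : Int)) % 256) x
      = (x + (l.map (fun c => (c.toNat : Int))).sum) % 256 := by
  induction l with
  | nil => intro x hx; simpa using hx.symm
  | cons c t ih =>
      intro x hx
      simp only [List.foldl_cons, List.map_cons, List.sum_cons]
      rw [ih _ (by omega)]
      generalize (t.map (fun c => (c.toNat : Int))).sum = S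
      omega

lemma pv_A_inv (m a : Int) : ∀ (k : Nat), k ≤ 256 →
    (List.range k).foldl (fun (l : List Int) (k' : Nat) =>
        PySem.List.pySetD l (PySem.List.pyGetD l (k' : Int) 0)
          ((m * PySem.List.pyGetD l (k' : Int) 0 + a) % 256)) (PySem.List.pyRange 0 256 1)
      = (List.range k).map (pvG m a) ++ PySem.List.pyRange (k : Int) 256 1 := by
  intro k
  induction k with
  | zero => intro _; simp
  | succ k ih =>
      intro hk
      have hk' : k ≤ 256 := by omega
      rw [List.range_succ, List.foldl_append, ih hk', List.foldl_cons, List.foldl_nil]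
      have hcons : PySem.List.pyRange (k : Int) 256 1
          = (k : Int) :: PySem.List.pyRange ((k : Int) + 1) 256 1 :=
        PySem.List.pyRange_one_cons (by exact_mod_cast hk)
      have hlen : ((List.range k).map (pvG m a)).length = k := by simp
      have hget : PySem.List.pyGetD
          ((List.range k).map (pvG m a) ++ PySem.List.pyRange (k : Int) 256 1) (k : Int) 0
            = (k : Int) := by
        rw [PySem.List.pyGetD_natCast, hcons]
        rw [List.getD_eq_getElem?_getD, List.getElem?_append_right (by omega)]
        simp [hlen]
      rw [hget, PySem.List.pySetD_natCast, hcons]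
      rw [List.set_append_right _ _ (by omega)]
      simp only [hlen, Nat.sub_self, List.set_cons_zero, List.map_append,
        List.map_cons, List.map_nil, List.append_assoc, List.cons_append, List.nil_append]
      push_cast
      simp [pvG]

lemma pv_B_inv (m a : Int) (ha : a % 256 = a) : ∀ (k : Nat),
    (List.range k).foldl (fun (s : List Int × Int) (_ : Nat) =>
        (s.1 ++ [s.2], (s.2 + m) % 256)) ([], a)
      = ((List.range k).map (pvG m a), pvG m a k) := by
  intro k
  induction k with
  | zero => simp [pvG, ha]
  | succ k ih =>
      rw [List.range_succ, List.foldl_append, ih, List.foldl_cons, List.foldl_nil,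
          List.map_append]
      simp only [Prod.mk.injEq, List.map_cons, List.map_nil]
      refine ⟨trivial, ?_⟩
      simp only [pvG]
      push_cast
      have h1 : m * ((k : Int) + 1) + a = (m * (k : Int) + a) + m := by ring
      rw [h1]
      generalize m * (k : Int) + a = t
      omega

lemma pv_mod256 (x : Int) : PySem.Int.mod x 256 = x % 256 :=
  PySem.Int.mod_eq_emod_of_pos (by norm_num)

-- ===== VERDICT (by name: the statement is the Claim_ definition above) =====
theorem create_modtable_spec : Claim_equal_create_modtable := by
  intro m kw _
  unfold Spec_create_modtable create_modtable create_modtable_alt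
  simp only [pv_mod256]
  rw [pv_addkey_fold _ 0 (by omega), pv_B_inv m _ (by omega)]
  simp only [Int.zero_add]
  have h := pv_A_inv m (((kw.toList.map (fun c => (c.toNat : Int))).sum) % 256) 256
    (le_refl _)
  rw [h, PySem.List.pyRange_one_eq_nil (by norm_num), List.append_nil]
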